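-- pv_equiv track=rewrite | github.com/ahmed9107/Python_practices | String_left_trim.py | string_left_trim
-- ===== SOURCE A (Python) =====
-- def string_left_trim(string, val = ' '):
--     result = ''
--     stop = False
--     for char in range(len(string)):
--         if (string[char] == val and stop == False):
--             continue
--         else:
--             stop = True
--         result += string[char]
--     return result
-- ===== SOURCE B (Python) =====
-- def string_left_trim(string, val=' '):
--     i = 0
--     n = len(string)
--     while i < n and string[i] == val:
--         i += 1
--     return string[i:]
-- ===== Notes on version B (the rewrite author's own statement) =====
-- stated objective: simpler
-- what changed: Instead of a flag-driven character-by-character accumulation, B just advances an index past the leading matching characters and returns one slice.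
import Mathlib
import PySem

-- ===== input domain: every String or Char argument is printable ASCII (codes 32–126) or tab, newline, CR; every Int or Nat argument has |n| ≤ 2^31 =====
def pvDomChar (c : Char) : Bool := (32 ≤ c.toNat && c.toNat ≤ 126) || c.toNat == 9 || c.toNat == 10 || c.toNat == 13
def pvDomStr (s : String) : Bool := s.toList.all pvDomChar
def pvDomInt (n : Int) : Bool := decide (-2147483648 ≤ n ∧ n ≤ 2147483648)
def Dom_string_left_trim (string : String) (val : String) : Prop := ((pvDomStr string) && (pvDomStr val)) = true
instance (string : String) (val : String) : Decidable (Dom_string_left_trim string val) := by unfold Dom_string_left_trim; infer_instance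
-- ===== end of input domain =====

-- B replaces A's flag-and-accumulate loop with an index advance plus one slice (simpler).


-- ===== PORT A =====
-- A: scan characters with a stop flag, skipping leading chars equal to val and
-- accumulating the rest (string[char] is a one-char string, so '== val' compares lists [c] = val.toList)
def stringLeftTrimGoA (val : List Char) : List Char → List Char → Bool → List Char
  | [], result, _ => result
  | c :: rest, result, stop =>
    if [c] = val ∧ stop = false then stringLeftTrimGoA val rest result stop
    else stringLeftTrimGoA val rest (result ++ [c]) true

def string_left_trim (string : String) (val : String) : String :=
  String.mk (stringLeftTrimGoA val.toList string.toList [] false)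

-- ===== PORT B =====
-- B: advance an index past leading chars equal to val, return the slice string[i:]
def stringLeftTrimCount (val : List Char) : List Char → Nat → Nat
  | c :: rest, i => if [c] = val then stringLeftTrimCount val rest (i + 1) else i
  | [], i => i

def string_left_trim_alt (string : String) (val : String) : String :=
  String.mk (string.toList.drop (stringLeftTrimCount val.toList string.toList 0))

-- ===== PRECONDITION & SPEC =====
def Spec_string_left_trim (string : String) (val : String) (out : String) : Prop := out = string_left_trim_alt string val
instance (string : String) (val : String) (out : String) : Decidable (Spec_string_left_trim string val out) := by unfold Spec_string_left_trim; infer_instance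

-- ===== CLAIM (what is proved, stated in full; the proofs are below) =====
def Claim_equal_string_left_trim : Prop := ∀ (string : String) (val : String), Dom_string_left_trim string val → Spec_string_left_trim string val (string_left_trim string val)

-- ===== LEMMAS AND PROOFS =====

-- ===== VERDICT (by name: the statement is the Claim_ definition above) =====
theorem goA_true (val acc : List Char) (cs : List Char) :
    stringLeftTrimGoA val cs acc true = acc ++ cs := by
  induction cs generalizing acc with
  | nil => simp [stringLeftTrimGoA]
  | cons c rest ih => simp [stringLeftTrimGoA, ih]

theorem count_succ (val : List Char) (cs : List Char) (i : Nat) :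
    stringLeftTrimCount val cs (i + 1) = stringLeftTrimCount val cs i + 1 := by
  induction cs generalizing i with
  | nil => simp [stringLeftTrimCount]
  | cons c rest ih =>
    simp only [stringLeftTrimCount]
    split_ifs with h
    · exact ih (i + 1)
    · rfl

theorem goA_eq_drop (val : List Char) (cs : List Char) :
    stringLeftTrimGoA val cs [] false = cs.drop (stringLeftTrimCount val cs 0) := by
  induction cs with
  | nil => simp [stringLeftTrimGoA, stringLeftTrimCount]
  | cons c rest ih =>
    by_cases h : [c] = val
    · simp only [stringLeftTrimGoA, stringLeftTrimCount, h, and_true]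
      rw [ih, count_succ]
      simp
    · simp [stringLeftTrimGoA, stringLeftTrimCount, h, goA_true]

theorem string_left_trim_spec : Claim_equal_string_left_trim := by
  intro string val _
  unfold Spec_string_left_trim string_left_trim string_left_trim_alt
  rw [goA_eq_drop]
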